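-- pv_equiv track=rewrite | github.com/ReznovLee/radar | test/visualization/plotter_test.py | calculate_switches
-- ===== SOURCE A (Python) =====
-- def calculate_switches(gantt_data):
--     # 按目标ID分组
--     target_segments = {}
--     for segment in gantt_data:
--         target_id = segment["target_id"]
--         if target_id not in target_segments:
--             target_segments[target_id] = []
--         target_segments[target_id].append(segment)
--
--     # 计算每个目标的切换次数
--     switches = {}
--     for target_id, segments in target_segments.items():
--         # 按开始时间排序
--         sorted_segments = sorted(segments, key=lambda x: x["start_time"])
--
--         # 计算雷达切换次数
--         switch_count = 0
--         for i in range(1, len(sorted_segments)):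
--             if sorted_segments[i]["radar_id"] != sorted_segments[i - 1]["radar_id"]:
--                 switch_count += 1
--
--         switches[target_id] = switch_count
--
--     return switches
-- ===== SOURCE B (Python) =====
-- def calculate_switches(gantt_data):
--     # Register every target with 0 switches, in first-appearance order.
--     switches = {}
--     for segment in gantt_data:
--         switches.setdefault(segment["target_id"], 0)
--
--     # One global stable sort by (target_id, start_time): each target's
--     # segments become a contiguous, time-ordered block.
--     ordered = sorted(gantt_data, key=lambda s: (s["target_id"], s["start_time"]))
--
--     # Single linear pass: a switch is an adjacent same-target pair with
--     # different radars.
--     prev = None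
--     for segment in ordered:
--         target_id = segment["target_id"]
--         if prev is not None and prev[0] == target_id \
--                 and prev[1]["radar_id"] != segment["radar_id"]:
--             switches[target_id] += 1
--         prev = (target_id, segment)
--     return switches
-- ===== Notes on version B (the rewrite author's own statement) =====
-- stated objective: alternative
-- what changed: A builds a dict of per-target segment lists and sorts each group separately before an indexed adjacent-pair scan; B instead registers every target once, performs ONE global stable sort by (target_id, start_time) and counts switches in a single linear pass over adjacent entries, relying on sort stability and contiguity of equal-target blocks.
import Mathlib
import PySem

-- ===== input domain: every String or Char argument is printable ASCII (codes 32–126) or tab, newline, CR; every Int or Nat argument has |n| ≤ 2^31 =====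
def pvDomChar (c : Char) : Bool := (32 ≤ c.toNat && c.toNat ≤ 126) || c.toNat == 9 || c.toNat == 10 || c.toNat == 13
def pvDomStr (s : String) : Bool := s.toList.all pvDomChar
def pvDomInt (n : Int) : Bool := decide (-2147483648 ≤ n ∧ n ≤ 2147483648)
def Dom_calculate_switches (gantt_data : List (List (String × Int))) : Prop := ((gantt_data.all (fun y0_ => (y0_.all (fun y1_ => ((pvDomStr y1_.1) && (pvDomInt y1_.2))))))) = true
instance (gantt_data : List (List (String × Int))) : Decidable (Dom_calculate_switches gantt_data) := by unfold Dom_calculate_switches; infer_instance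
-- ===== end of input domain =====

-- B replaces A's dict-of-lists + per-group sorts by ONE global stable sort on
-- (target_id, start_time) followed by a single linear pass counting adjacent
-- same-target radar changes (objective: alternative decomposition, same cost).

-- segment["key"] : first-match lookup in the segment dict (total form; Pre_ keeps
-- us on inputs where the Python lookup succeeds wherever it is performed)
def segGet (seg : List (String × Int)) (k : String) : Int :=
  (PySem.Dict.mk seg).getD k 0

def hasKey (seg : List (String × Int)) (k : String) : Bool :=
  ((PySem.Dict.mk seg).get? k).isSome

-- ===== PORT A =====
def calculate_switches (gantt_data : List (List (String × Int))) : List (Int × Int) :=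
  -- 按目标ID分组
  let target_segments : PySem.Dict Int (List (List (String × Int))) :=
    gantt_data.foldl (fun d segment =>
      let target_id := segGet segment "target_id"
      let d := if d.contains target_id then d else d.insert target_id []
      d.modify target_id [] (fun l => l ++ [segment])) PySem.Dict.empty
  -- 计算每个目标的切换次数
  let switches : PySem.Dict Int Int :=
    target_segments.items.foldl (fun sw p =>
      let sorted_segments := PySem.List.sorted p.2 (fun x => segGet x "start_time")
      let switch_count : Int :=
        (PySem.List.pyRange 1 (PySem.List.len sorted_segments) 1).foldl (fun c i =>
          if segGet (PySem.List.pyGetD sorted_segments i []) "radar_id"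
             ≠ segGet (PySem.List.pyGetD sorted_segments (i - 1) []) "radar_id"
          then c + 1 else c) 0
      sw.insert p.1 switch_count) PySem.Dict.empty
  switches.items

-- ===== PORT B =====
def calculate_switches_alt (gantt_data : List (List (String × Int))) : List (Int × Int) :=
  let switches : PySem.Dict Int Int :=
    gantt_data.foldl (fun d segment => d.setdefault (segGet segment "target_id") 0)
      PySem.Dict.empty
  let ordered := PySem.List.sorted2 gantt_data
    (fun s => segGet s "target_id") (fun s => segGet s "start_time")
  let final := ordered.foldl
    (fun (st : PySem.Dict Int Int × Option (Int × List (String × Int))) segment =>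
      let target_id := segGet segment "target_id"
      let sw := match st.2 with
        | some prev =>
            if prev.1 = target_id ∧ segGet prev.2 "radar_id" ≠ segGet segment "radar_id"
            then st.1.modify target_id 0 (· + 1) else st.1
        | none => st.1
      (sw, some (target_id, segment))) (switches, none)
  final.1.items

-- ===== PRECONDITION & SPEC =====
-- Pre_ admits exactly the inputs on which the Python A returns: every segment has
-- "target_id" and "start_time", and a segment whose target occurs at least twice
-- also has "radar_id" (otherwise A raises KeyError).
def Pre_calculate_switches (gantt_data : List (List (String × Int))) : Prop :=
  ∀ seg ∈ gantt_data, hasKey seg "target_id" = true ∧ hasKey seg "start_time" = true ∧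
    (2 ≤ gantt_data.countP (fun s => segGet s "target_id" == segGet seg "target_id") →
      hasKey seg "radar_id" = true)

instance (gantt_data : List (List (String × Int))) : Decidable (Pre_calculate_switches gantt_data) := by
  unfold Pre_calculate_switches; infer_instance

def pvWitness_calculate_switches : (List (List (String × Int))) :=
  [[("target_id", 1), ("start_time", 3), ("radar_id", 7)],
   [("target_id", 1), ("start_time", 0), ("radar_id", 8)],
   [("target_id", 2), ("start_time", 5)]]

def Spec_calculate_switches (gantt_data : List (List (String × Int))) (out : List (Int × Int)) : Prop := out = calculate_switches_alt gantt_data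
instance (gantt_data : List (List (String × Int))) (out : List (Int × Int)) : Decidable (Spec_calculate_switches gantt_data out) := by unfold Spec_calculate_switches; infer_instance

-- ===== CLAIM (what is proved, stated in full; the proofs are below) =====
def Claim_equal_calculate_switches : Prop := ∀ (gantt_data : List (List (String × Int))), Dom_calculate_switches gantt_data → Pre_calculate_switches gantt_data → Spec_calculate_switches gantt_data (calculate_switches gantt_data)

-- ===== LEMMAS AND PROOFS =====

-- proof-side abbreviations for the three fields
def tk (s : List (String × Int)) : Int := segGet s "target_id"
def sk (s : List (String × Int)) : Int := segGet s "start_time"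
def rk (s : List (String × Int)) : Int := segGet s "radar_id"

-- the strict "before" predicate of B's global sort (sorted2's lexicographic lt)
def plt (a b : List (String × Int)) : Bool :=
  decide (tk a < tk b) || (!decide (tk b < tk a) && decide (sk a < sk b))

-- its reflexive counterpart, used as the sortedness invariant
def pkle (a b : List (String × Int)) : Prop :=
  tk a < tk b ∨ (tk a = tk b ∧ sk a ≤ sk b)

-- first-appearance list of targets
def tgts (g : List (List (String × Int))) : List Int := PySem.Set.ofList (g.map tk)

-- number of adjacent pairs with different radars
def cntAdj (m : List (List (String × Int))) : Nat :=
  (m.zip m.tail).countP (fun p => decide (rk p.1 ≠ rk p.2))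

-- number of adjacent same-target (= t) pairs with different radars
def cntT (t : Int) (l : List (List (String × Int))) : Nat :=
  (l.zip l.tail).countP (fun p => decide (tk p.1 = tk p.2 ∧ rk p.1 ≠ rk p.2 ∧ tk p.2 = t))

theorem plt_trans_pkle {x y z : List (String × Int)} (h1 : plt x y = true) (h2 : pkle y z) :
    plt x z = true := by
  simp only [plt, pkle, Bool.or_eq_true, Bool.and_eq_true, Bool.not_eq_true', decide_eq_true_eq, decide_eq_false_iff_not, not_lt] at *
  omega

theorem pkle_of_not_plt {x y : List (String × Int)} (h : plt x y = false) : pkle y x := by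
  simp only [plt, pkle, Bool.or_eq_false_iff, Bool.and_eq_false_iff, Bool.not_eq_false', decide_eq_true_eq, decide_eq_false_iff_not, not_lt] at *
  omega

theorem insertBy_eq_cons {x : List (String × Int)} {m : List (List (String × Int))}
    (h : ∀ z ∈ m, plt x z = true) : PySem.List.insertBy plt x m = x :: m := by
  cases m with
  | nil => rfl
  | cons y ys => simp [PySem.List.insertBy, h y (by simp)]

theorem insertBy_congr {b1 b2 : List (String × Int) → List (String × Int) → Bool}
    {x : List (String × Int)} {m : List (List (String × Int))}
    (h : ∀ z ∈ m, b1 x z = b2 x z) :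
    PySem.List.insertBy b1 x m = PySem.List.insertBy b2 x m := by
  induction m with
  | nil => rfl
  | cons y ys ih =>
    simp only [PySem.List.insertBy, h y (by simp)]
    rw [ih (fun z hz => h z (by simp [hz]))]

theorem pkle_of_plt {x y : List (String × Int)} (h : plt x y = true) : pkle x y := by
  simp only [plt, pkle, Bool.or_eq_true, Bool.and_eq_true, Bool.not_eq_true', decide_eq_true_eq, decide_eq_false_iff_not, not_lt] at *
  omega

theorem insertBy_pairwise {x : List (String × Int)} {m : List (List (String × Int))}
    (h : m.Pairwise pkle) : (PySem.List.insertBy plt x m).Pairwise pkle := by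
  induction m with
  | nil => simp [PySem.List.insertBy]
  | cons y ys ih =>
    rcases List.pairwise_cons.mp h with ⟨hy, hys⟩
    by_cases hb : plt x y = true
    · simp only [PySem.List.insertBy, hb, if_true]
      refine List.pairwise_cons.mpr ⟨?_, h⟩
      intro z hz
      rcases List.mem_cons.mp hz with rfl | hz
      · exact pkle_of_plt hb
      · exact pkle_of_plt (plt_trans_pkle hb (hy z hz))
    · simp only [PySem.List.insertBy, hb]
      refine List.pairwise_cons.mpr ⟨?_, ih hys⟩
      intro z hz
      rcases (PySem.List.mem_insertBy plt x z ys).mp hz with rfl | hz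
      · exact pkle_of_not_plt (by simpa using hb)
      · exact hy z hz

theorem sorted2_eq_foldl (g : List (List (String × Int))) :
    PySem.List.sorted2 g tk sk = g.foldl (fun acc x => PySem.List.insertBy plt x acc) [] := rfl

theorem sorted2_pairwise (g : List (List (String × Int))) :
    (PySem.List.sorted2 g tk sk).Pairwise pkle := by
  rw [sorted2_eq_foldl]
  suffices h : ∀ (acc : List (List (String × Int))), acc.Pairwise pkle →
      (g.foldl (fun acc x => PySem.List.insertBy plt x acc) acc).Pairwise pkle from
    h [] (by simp)
  induction g with
  | nil => exact fun acc h => h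
  | cons x g ih => exact fun acc h => ih _ (insertBy_pairwise h)

theorem insertBy_cons {α : Type} (b : α → α → Bool) (x y : α) (ys : List α) :
    PySem.List.insertBy b x (y :: ys) =
      if b x y = true then x :: y :: ys else y :: PySem.List.insertBy b x ys := rfl

theorem filter_insertBy (p : List (String × Int) → Bool) (x : List (String × Int))
    (ys : List (List (String × Int))) (hs : ys.Pairwise pkle) :
    (PySem.List.insertBy plt x ys).filter p =
      if p x then PySem.List.insertBy plt x (ys.filter p) else ys.filter p := by
  induction ys with
  | nil => by_cases hp : p x <;> simp [PySem.List.insertBy, hp]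
  | cons y ys ih =>
    rcases List.pairwise_cons.mp hs with ⟨hy, hys⟩
    rw [insertBy_cons]
    by_cases hb : plt x y = true
    · rw [if_pos hb]
      by_cases hp : p x = true
      · rw [List.filter_cons_of_pos hp, if_pos hp]
        rw [insertBy_eq_cons (fun z hz => ?_)]
        rcases List.mem_cons.mp (List.mem_of_mem_filter hz) with rfl | hz'
        · exact hb
        · exact plt_trans_pkle hb (hy z hz')
      · rw [List.filter_cons_of_neg hp, if_neg hp]
    · rw [if_neg hb]
      by_cases hpy : p y = true
      · rw [List.filter_cons_of_pos hpy, ih hys]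
        by_cases hp : p x = true
        · rw [if_pos hp, if_pos hp, List.filter_cons_of_pos hpy, insertBy_cons, if_neg hb]
        · rw [if_neg hp, if_neg hp, List.filter_cons_of_pos hpy]
      · rw [List.filter_cons_of_neg hpy, ih hys]
        by_cases hp : p x = true
        · rw [if_pos hp, if_pos hp, List.filter_cons_of_neg hpy]
        · rw [if_neg hp, if_neg hp, List.filter_cons_of_neg hpy]

theorem filter_sorted2 (t : Int) (g : List (List (String × Int))) :
    (PySem.List.sorted2 g tk sk).filter (fun s => tk s == t) =
      PySem.List.sorted (g.filter (fun s => tk s == t)) sk := by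
  induction g using List.reverseRecOn with
  | nil => rfl
  | append_singleton g x ih =>
    rw [sorted2_eq_foldl, List.foldl_append, List.foldl_cons, List.foldl_nil, ← sorted2_eq_foldl,
      filter_insertBy _ _ _ (sorted2_pairwise g), ih, List.filter_append]
    by_cases hx : (tk x == t) = true
    · rw [if_pos (by simpa using hx)]
      have hfx : List.filter (fun s => tk s == t) [x] = [x] := by simp [hx]
      rw [hfx, PySem.List.sorted_eq_foldl_insertBy, PySem.List.sorted_eq_foldl_insertBy,
        List.foldl_append, List.foldl_cons, List.foldl_nil]
      refine insertBy_congr (fun z hz => ?_)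
      have hz' : z ∈ (g.filter (fun s => tk s == t)) := by
        have hmem : z ∈ PySem.List.sorted (g.filter (fun s => tk s == t)) sk := by
          rw [PySem.List.sorted_eq_foldl_insertBy]; exact hz
        exact (PySem.List.sorted_perm (g.filter (fun s => tk s == t)) sk false).mem_iff.mp hmem
      have htz : tk z = t := by simpa using (List.of_mem_filter hz')
      have htx : tk x = t := by simpa using hx
      simp [plt, htx, htz]
    · rw [if_neg (by simpa using hx)]
      have hfx : List.filter (fun s => tk s == t) [x] = [] := by simp [hx]
      rw [hfx, List.append_nil]

theorem cntT_eq_cntAdj_filter (t : Int) (l : List (List (String × Int)))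
    (hs : l.Pairwise (fun a b => tk a ≤ tk b)) :
    cntT t l = cntAdj (l.filter (fun s => tk s == t)) := by
  induction l with
  | nil => rfl
  | cons a l ih =>
    rcases List.pairwise_cons.mp hs with ⟨ha, hl⟩
    cases l with
    | nil => by_cases h : (tk a == t) = true <;> simp [cntT, cntAdj, h]
    | cons b r =>
      by_cases hat : tk a = t
      · by_cases hbt : tk b = t
        · have hfil : (b :: r).filter (fun s => tk s == t) = b :: r.filter (fun s => tk s == t) :=
            List.filter_cons_of_pos (by simpa using hbt)
          have lhs1 : cntT t (a :: b :: r) =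
              (if tk a = tk b ∧ rk a ≠ rk b ∧ tk b = t then 1 else 0) + cntT t (b :: r) := by
            simp only [cntT, List.tail_cons, List.zip_cons_cons, List.countP_cons]
            by_cases hc : tk a = tk b ∧ rk a ≠ rk b ∧ tk b = t <;> simp [hc] ; omega
          have rhs1 : cntAdj ((a :: b :: r).filter (fun s => tk s == t)) =
              (if rk a ≠ rk b then 1 else 0) + cntAdj ((b :: r).filter (fun s => tk s == t)) := by
            rw [List.filter_cons_of_pos (by simpa using hat), hfil]
            simp only [cntAdj, List.tail_cons, List.zip_cons_cons, List.countP_cons]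
            by_cases hc : rk a ≠ rk b <;> simp [hc] ; omega
          rw [lhs1, rhs1, ih hl]
          congr 1
          by_cases hc : rk a ≠ rk b <;> simp [hc, hat, hbt]
        · have htb : t < tk b := lt_of_le_of_ne (hat ▸ ha b (by simp)) (Ne.symm hbt)
          have hbig : ∀ x ∈ b :: r, tk x ≠ t := by
            intro x hx
            rcases List.mem_cons.mp hx with rfl | hx
            · exact fun h => absurd h.symm (ne_of_lt htb)
            · have := (List.pairwise_cons.mp hl).1 x hx
              omega
          have lhs0 : cntT t (a :: b :: r) = 0 := by
            refine List.countP_eq_zero.mpr (fun p hp => ?_)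
            have := (List.of_mem_zip hp).2
            simp only [List.tail_cons] at this
            simp [hbig p.2 this]
          have hfil : (b :: r).filter (fun s => tk s == t) = [] :=
            List.filter_eq_nil_iff.mpr (fun x hx => by simp [hbig x hx])
          rw [lhs0, List.filter_cons_of_pos (by simpa using hat), hfil]
          rfl
      · have lhs1 : cntT t (a :: b :: r) = cntT t (b :: r) := by
          simp only [cntT, List.tail_cons, List.zip_cons_cons, List.countP_cons]
          have : ¬(tk a = tk b ∧ rk a ≠ rk b ∧ tk b = t) := by
            rintro ⟨h1, _, h3⟩; exact hat (h1.trans h3)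
          simp [this]
        rw [lhs1, List.filter_cons_of_neg (by simpa using hat), ih hl]

theorem zip_tail_eq_map_range (m : List (List (String × Int))) :
    m.zip m.tail = (PySem.List.pyRange 1 (PySem.List.len m) 1).map
      (fun i => (PySem.List.pyGetD m (i - 1) [], PySem.List.pyGetD m i [])) := by
  apply List.ext_getElem
  · simp [PySem.List.length_pyRange_one, PySem.List.len_eq, List.length_zip]
  · intro k h1 h2
    have hk : k + 1 < m.length := by
      simp [List.length_zip] at h1; omega
    have hr : k < (PySem.List.pyRange 1 (PySem.List.len m) 1).length := by
      simp [PySem.List.length_pyRange_one, PySem.List.len_eq]; omega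
    rw [List.getElem_zip, List.getElem_map, PySem.List.getElem_pyRange_one _ _ _ hr]
    have e1 : (1 : Int) + ↑k - 1 = ((k : Nat) : Int) := by omega
    have e2 : (1 : Int) + ↑k = (((k + 1 : Nat)) : Int) := by omega
    rw [e1, e2, PySem.List.pyGetD_natCast, PySem.List.pyGetD_natCast,
      List.getD_eq_getElem _ _ (by omega), List.getD_eq_getElem _ _ hk, List.getElem_tail]

theorem idx_loop_eq_cntAdj (m : List (List (String × Int))) :
    (PySem.List.pyRange 1 (PySem.List.len m) 1).foldl (fun c i =>
      if segGet (PySem.List.pyGetD m i []) "radar_id"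
         ≠ segGet (PySem.List.pyGetD m (i - 1) []) "radar_id"
      then c + 1 else c) (0 : Int) = (cntAdj m : Int) := by
  rw [PySem.List.foldl_ite_add_one
      (fun i => segGet (PySem.List.pyGetD m i []) "radar_id"
         ≠ segGet (PySem.List.pyGetD m (i - 1) []) "radar_id"), zero_add]
  unfold cntAdj
  rw [zip_tail_eq_map_range, List.countP_map]
  congr 1
  apply List.countP_congr
  intro i _
  simp only [Function.comp_apply, rk, decide_eq_true_eq]
  exact ne_comm

theorem insert_insert_of_not_contains {d : PySem.Dict Int (List (List (String × Int)))}
    {t : Int} {x y : List (List (String × Int))} (hc : d.contains t = false) :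
    (d.insert t x).insert t y = d.insert t y := by
  have hmem : ∀ p ∈ d.items, (p.1 == t) = false := by
    intro p hp
    by_contra h
    simp only [Bool.not_eq_false] at h
    have : d.contains t = true := List.any_eq_true.mpr ⟨p, hp, h⟩
    rw [hc] at this; exact Bool.false_ne_true this
  apply PySem.Dict.ext
  rw [PySem.Dict.items_insert_of_contains _ _ (PySem.Dict.contains_insert_self d t x),
    PySem.Dict.items_insert_of_not_contains d x hc,
    PySem.Dict.items_insert_of_not_contains d y hc, List.map_append]
  congr 1
  · rw [List.map_congr_left (fun p hp => by rw [if_neg (by simp [hmem p hp])])]; simp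
  · simp

theorem groupA_eq_modify (g : List (List (String × Int))) :
    g.foldl (fun d segment =>
      let target_id := segGet segment "target_id"
      let d := if d.contains target_id then d else d.insert target_id []
      d.modify target_id [] (fun l => l ++ [segment]))
      (PySem.Dict.empty : PySem.Dict Int (List (List (String × Int)))) =
    g.foldl (fun d segment => d.modify (tk segment) [] (fun l => l ++ [segment])) PySem.Dict.empty := by
  refine PySem.List.foldl_congr_mem g _ _ _ (fun d s _ => ?_)
  show (let t := segGet s "target_id";
        let d' := if d.contains t then d else d.insert t [];
        d'.modify t [] (fun l => l ++ [s])) = _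
  by_cases hc : d.contains (segGet s "target_id") = true
  · simp only [hc, if_true]; rfl
  · simp only [Bool.not_eq_true] at hc
    simp only [hc]
    show (d.insert (segGet s "target_id") []).modify _ [] _ = d.modify (tk s) [] _
    unfold PySem.Dict.modify
    rw [PySem.Dict.getD_insert_self, insert_insert_of_not_contains hc,
      PySem.Dict.getD_of_not_contains d _ (show d.contains (tk s) = false from hc)]
    rfl

-- the grouping dict, abbreviated
def groupD (g : List (List (String × Int))) : PySem.Dict Int (List (List (String × Int))) :=
  g.foldl (fun d segment => d.modify (tk segment) [] (fun l => l ++ [segment])) PySem.Dict.empty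

theorem groupD_pairs (g : List (List (String × Int))) :
    groupD g = (g.map (fun s => (tk s, s))).foldl
      (fun d p => d.modify p.1 [] (fun l => l ++ [p.2])) PySem.Dict.empty := by
  rw [List.foldl_map]; rfl

theorem groupD_getD (g : List (List (String × Int))) (t : Int) :
    (groupD g).getD t [] = g.filter (fun s => tk s == t) := by
  rw [groupD_pairs, PySem.Dict.getD_foldl_modify_append, PySem.Dict.getD_empty, List.nil_append,
    List.filter_map]
  have h1 : ((fun (p : Int × List (String × Int)) => p.1 == t) ∘ (fun s => (tk s, s))) = (fun s => tk s == t) := rfl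
  rw [h1, List.map_map]
  have h2 : ((fun (x : Int × List (String × Int)) => x.2) ∘ (fun s => (tk s, s))) = id := rfl
  rw [h2, List.map_id]

theorem groupD_keys (g : List (List (String × Int))) : (groupD g).keys = tgts g := by
  unfold groupD
  rw [PySem.Dict.keys_foldl_modify_key g tk [] (fun _ segment => (fun l => l ++ [segment]))]
  show PySem.Set.update PySem.Dict.empty.keys _ = _
  have h : (PySem.Dict.empty : PySem.Dict Int (List (List (String × Int)))).keys = [] := rfl
  rw [h, PySem.Set.update_nil_left]
  rfl

theorem groupD_items (g : List (List (String × Int))) :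
    (groupD g).items = (tgts g).map (fun t => (t, g.filter (fun s => tk s == t))) := by
  rw [PySem.Dict.items_eq_map_keys (groupD g) (by rw [groupD_keys]; exact PySem.Set.nodup_ofList _) []]
  rw [groupD_keys]
  exact List.map_congr_left (fun t _ => by rw [groupD_getD])

-- A's inner counting loop
def innerC (m : List (List (String × Int))) : Int :=
  (PySem.List.pyRange 1 (PySem.List.len m) 1).foldl (fun c i =>
    if segGet (PySem.List.pyGetD m i []) "radar_id"
       ≠ segGet (PySem.List.pyGetD m (i - 1) []) "radar_id"
    then c + 1 else c) 0

theorem innerC_eq (m : List (List (String × Int))) : innerC m = (cntAdj m : Int) :=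
  idx_loop_eq_cntAdj m

theorem calc_A_eq (g : List (List (String × Int))) :
    calculate_switches g =
      (tgts g).map (fun t =>
        (t, (cntAdj (PySem.List.sorted (g.filter (fun s => tk s == t)) sk) : Int))) := by
  show ((g.foldl (fun d segment =>
      let target_id := segGet segment "target_id"
      let d := if d.contains target_id then d else d.insert target_id []
      d.modify target_id [] (fun l => l ++ [segment])) PySem.Dict.empty).items.foldl
        (fun sw p => sw.insert p.1 (innerC (PySem.List.sorted p.2 (fun x => segGet x "start_time"))))
        PySem.Dict.empty).items = _
  rw [groupA_eq_modify]
  show ((groupD g).items.foldl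
        (fun sw p => sw.insert p.1 (innerC (PySem.List.sorted p.2 (fun x => segGet x "start_time"))))
        PySem.Dict.empty).items = _
  have hfresh : (List.foldl
        (fun sw p => sw.insert p.1 (innerC (PySem.List.sorted p.2 (fun x => segGet x "start_time"))))
        PySem.Dict.empty (groupD g).items).items
      = ([] : List (Int × Int)) ++ (groupD g).items.map
          (fun p => (p.1, innerC (PySem.List.sorted p.2 (fun x => segGet x "start_time")))) :=
    PySem.Dict.items_foldl_insert_fresh (groupD g).items
      (fun (p : Int × List (List (String × Int))) => p.1)
      (fun (p : Int × List (List (String × Int))) =>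
        innerC (PySem.List.sorted p.2 (fun x => segGet x "start_time"))) PySem.Dict.empty
      (fun a _ => PySem.Dict.contains_empty a.1)
      (by
        show ((groupD g).items.map (fun (p : Int × List (List (String × Int))) => p.1)).Nodup
        have h : (groupD g).items.map (fun (p : Int × List (List (String × Int))) => p.1) = (groupD g).keys := rfl
        rw [h, groupD_keys]; exact PySem.Set.nodup_ofList _)
  rw [hfresh]
  show ([] : List (Int × Int)) ++ _ = _
  rw [List.nil_append, groupD_items, List.map_map]
  refine List.map_congr_left (fun t _ => ?_)
  show (t, innerC (PySem.List.sorted (g.filter (fun s => tk s == t)) (fun x => segGet x "start_time"))) = _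
  rw [innerC_eq]
  rfl

def sw0 (g : List (List (String × Int))) : PySem.Dict Int Int :=
  g.foldl (fun d segment => d.setdefault (segGet segment "target_id") 0) PySem.Dict.empty

theorem sw0_items (g : List (List (String × Int))) :
    (sw0 g).items = (tgts g).map (fun t => (t, (0 : Int))) := by
  induction g using List.reverseRecOn with
  | nil => rfl
  | append_singleton g x ih =>
    unfold sw0
    rw [List.foldl_append, List.foldl_cons, List.foldl_nil]
    have htg : tgts (g ++ [x]) = PySem.Set.add (tgts g) (tk x) := by
      unfold tgts; rw [List.map_append]; exact PySem.Set.ofList_append_singleton _ _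
    have hkeys : (sw0 g).keys = tgts g := by
      show (sw0 g).items.map (fun p => p.1) = _
      rw [ih, List.map_map,
        show ((fun (p : Int × Int) => p.1) ∘ (fun t => (t, (0 : Int)))) = id from rfl, List.map_id]
    by_cases hx : tk x ∈ tgts g
    · have hc : (sw0 g).contains (segGet x "target_id") = true := by
        rw [PySem.Dict.contains_iff_mem_keys, hkeys]; exact hx
      show ((sw0 g).setdefault (segGet x "target_id") 0).items = _
      unfold PySem.Dict.setdefault
      rw [if_pos hc, ih, htg, PySem.Set.add_of_mem hx]
    · have hc : (sw0 g).contains (segGet x "target_id") = true → False := by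
        rw [PySem.Dict.contains_iff_mem_keys, hkeys]; exact hx
      show ((sw0 g).setdefault (segGet x "target_id") 0).items = _
      unfold PySem.Dict.setdefault
      rw [if_neg hc]
      show (sw0 g).items ++ [(segGet x "target_id", (0 : Int))] = _
      rw [ih, htg, PySem.Set.add_of_not_mem hx, List.map_append]
      rfl

-- B's linear pass, step and pair forms
def stepB (st : PySem.Dict Int Int × Option (Int × List (String × Int)))
    (segment : List (String × Int)) : PySem.Dict Int Int × Option (Int × List (String × Int)) :=
  let target_id := segGet segment "target_id"
  let sw := match st.2 with
    | some prev =>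
        if prev.1 = target_id ∧ segGet prev.2 "radar_id" ≠ segGet segment "radar_id"
        then st.1.modify target_id 0 (· + 1) else st.1
    | none => st.1
  (sw, some (target_id, segment))

def pairStep (d : PySem.Dict Int Int) (p : List (String × Int) × List (String × Int)) :
    PySem.Dict Int Int :=
  if tk p.1 = tk p.2 ∧ rk p.1 ≠ rk p.2 then d.modify (tk p.2) 0 (· + 1) else d

theorem passB (l : List (List (String × Int))) : ∀ (d : PySem.Dict Int Int) (a : List (String × Int)),
    (l.foldl stepB (d, some (tk a, a))).1 = ((a :: l).zip l).foldl pairStep d := by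
  induction l with
  | nil => intro d a; rfl
  | cons b l ih =>
    intro d a
    rw [List.foldl_cons, List.zip_cons_cons, List.foldl_cons]
    have hstep : stepB (d, some (tk a, a)) b = (pairStep d (a, b), some (tk b, b)) := rfl
    rw [hstep, ih]

theorem passB_top (l : List (List (String × Int))) (d : PySem.Dict Int Int) :
    (l.foldl stepB (d, none)).1 = (l.zip l.tail).foldl pairStep d := by
  cases l with
  | nil => rfl
  | cons a l =>
    rw [List.foldl_cons]
    have hstep : stepB (d, none) a = (d, some (tk a, a)) := rfl
    rw [hstep, passB, List.tail_cons]

theorem pairStep_getD (l : List (List (String × Int) × List (String × Int))) :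
    ∀ (d : PySem.Dict Int Int) (t : Int),
    (l.foldl pairStep d).getD t 0 = d.getD t 0 +
      (l.countP (fun p => decide (tk p.1 = tk p.2 ∧ rk p.1 ≠ rk p.2 ∧ tk p.2 = t)) : Int) := by
  induction l with
  | nil => intro d t; simp
  | cons p l ih =>
    intro d t
    rw [List.foldl_cons, List.countP_cons, ih]
    unfold pairStep
    by_cases hc : tk p.1 = tk p.2 ∧ rk p.1 ≠ rk p.2
    · rw [if_pos hc, PySem.Dict.getD_modify]
      by_cases ht : t = tk p.2
      · rw [if_pos ht]
        have : decide (tk p.1 = tk p.2 ∧ rk p.1 ≠ rk p.2 ∧ tk p.2 = t) = true := by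
          simp [hc.1, hc.2, ht.symm]
        rw [this, ht]
        simp only [if_true]
        omega
      · rw [if_neg ht]
        have : decide (tk p.1 = tk p.2 ∧ rk p.1 ≠ rk p.2 ∧ tk p.2 = t) = false := by
          simp only [decide_eq_false_iff_not]
          rintro ⟨_, _, h3⟩; exact ht h3.symm
        rw [this]
        simp
    · rw [if_neg hc]
      have : decide (tk p.1 = tk p.2 ∧ rk p.1 ≠ rk p.2 ∧ tk p.2 = t) = false := by
        simp only [decide_eq_false_iff_not]
        rintro ⟨h1, h2, _⟩; exact hc ⟨h1, h2⟩
      rw [this]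
      simp

theorem pairStep_keys (l : List (List (String × Int) × List (String × Int))) :
    ∀ (d : PySem.Dict Int Int), (∀ p ∈ l, tk p.2 ∈ d.keys) →
    (l.foldl pairStep d).keys = d.keys := by
  induction l with
  | nil => intro d _; rfl
  | cons p l ih =>
    intro d h
    rw [List.foldl_cons]
    have hk : (pairStep d p).keys = d.keys := by
      unfold pairStep
      by_cases hc : tk p.1 = tk p.2 ∧ rk p.1 ≠ rk p.2
      · rw [if_pos hc, PySem.Dict.keys_modify, PySem.Dict.keys_insert_of_contains]
        rw [PySem.Dict.contains_iff_mem_keys]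
        exact h p (by simp)
      · rw [if_neg hc]
    rw [ih (pairStep d p) (fun q hq => by rw [hk]; exact h q (by simp [hq])), hk]

theorem sw0_keys (g : List (List (String × Int))) : (sw0 g).keys = tgts g := by
  show (sw0 g).items.map (fun p => p.1) = _
  rw [sw0_items, List.map_map,
    show ((fun (p : Int × Int) => p.1) ∘ (fun t => (t, (0 : Int)))) = id from rfl, List.map_id]

theorem calc_B_eq (g : List (List (String × Int))) :
    calculate_switches_alt g =
      (tgts g).map (fun t => (t, (cntT t (PySem.List.sorted2 g tk sk) : Int))) := by
  show ((PySem.List.sorted2 g tk sk).foldl stepB (sw0 g, none)).1.items = _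
  rw [passB_top]
  have hnodup0 : (sw0 g).keys.Nodup := by rw [sw0_keys]; exact PySem.Set.nodup_ofList _
  have hmem : ∀ p ∈ (PySem.List.sorted2 g tk sk).zip (PySem.List.sorted2 g tk sk).tail,
      tk p.2 ∈ (sw0 g).keys := by
    intro p hp
    have h3 : p.2 ∈ PySem.List.sorted2 g tk sk := List.mem_of_mem_tail (List.of_mem_zip hp).2
    have h4 : p.2 ∈ g := (PySem.List.sorted2_perm g tk sk false).mem_iff.mp h3
    rw [sw0_keys]
    exact (PySem.Set.mem_ofList _ _).mpr (List.mem_map_of_mem h4)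
  have hkeys : (((PySem.List.sorted2 g tk sk).zip (PySem.List.sorted2 g tk sk).tail).foldl
      pairStep (sw0 g)).keys = tgts g := by
    rw [pairStep_keys _ _ hmem, sw0_keys]
  rw [PySem.Dict.items_eq_map_keys _ (by rw [hkeys]; exact PySem.Set.nodup_ofList _) 0, hkeys]
  refine List.map_congr_left (fun t ht => ?_)
  rw [pairStep_getD]
  have h0 : (sw0 g).getD t 0 = 0 := by
    have hmemit : (t, (0 : Int)) ∈ (sw0 g).items := by
      rw [sw0_items]; exact List.mem_map_of_mem ht
    exact PySem.Dict.getD_of_mem_items _ hmemit hnodup0 0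
  rw [h0, zero_add]
  rfl

-- ===== VERDICT (by name: the statement is the Claim_ definition above) =====
theorem calculate_switches_spec : Claim_equal_calculate_switches := by
  intro g _ _
  show calculate_switches g = calculate_switches_alt g
  rw [calc_A_eq, calc_B_eq]
  refine List.map_congr_left (fun t _ => ?_)
  rw [cntT_eq_cntAdj_filter t _ ((sorted2_pairwise g).imp (fun h => by
        rcases h with h | ⟨h, _⟩ <;> omega)),
      filter_sorted2]
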